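-- pv_equiv track=rewrite | github.com/AdityaSharma2485/gfg | Odd Even Problem.py | oddEven
-- ===== SOURCE A (Python) =====
-- def oddEven(s : str) -> str:
--     from collections import Counter
--
--     # Step 1: Calculate frequency of each character
--     freq = Counter(s)
--
--     # Initialize counters for x and y
--     x = 0
--     y = 0
--
--     # Step 2: Classify characters
--     for char, count in freq.items():
--         position = ord(char) - ord('a') + 1  # Position in alphabet (1-based index)
--
--         if position % 2 == 0:  # Even position
--             if count % 2 == 0:  # Even frequency
--                 x += 1
--         else:  # Odd position
--             if count % 2 != 0:  # Odd frequency
--                 y += 1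
--
--     # Step 3: Sum x and y and check parity
--     if (x + y) % 2 == 0:
--         return "EVEN"
--     else:
--         return "ODD"
-- ===== SOURCE B (Python) =====
-- def oddEven(s: str) -> str:
--     # Closed-form parity identity instead of classifying each character:
--     # a char qualifies iff its count parity equals its alphabet-position parity,
--     # and summing [count(c) == ord(c) (mod 2)] over distinct chars c gives
--     # len(s) + #{distinct chars with even ord}  (mod 2).
--     distinct_even = len({c for c in s if ord(c) % 2 == 0})
--     return "EVEN" if (len(s) + distinct_even) % 2 == 0 else "ODD"
-- ===== Notes on version B (the rewrite author's own statement) =====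
-- stated objective: alternative
-- what changed: Replaces the Counter build plus per-character parity classification (x/y branch counters) with a closed-form parity identity: the answer is the parity of len(s) plus the number of distinct even-ord characters, so B only builds one set of even-ord chars and does one modular addition.
import Mathlib
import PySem

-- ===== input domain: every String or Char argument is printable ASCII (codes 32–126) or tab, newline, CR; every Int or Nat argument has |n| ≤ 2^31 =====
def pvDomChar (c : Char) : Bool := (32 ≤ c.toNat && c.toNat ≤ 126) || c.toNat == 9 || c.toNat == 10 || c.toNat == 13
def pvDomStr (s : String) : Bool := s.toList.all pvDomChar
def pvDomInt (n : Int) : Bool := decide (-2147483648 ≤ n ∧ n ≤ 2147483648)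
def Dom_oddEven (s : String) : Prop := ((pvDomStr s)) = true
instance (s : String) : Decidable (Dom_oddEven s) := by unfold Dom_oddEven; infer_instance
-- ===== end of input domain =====

-- B replaces A's Counter + per-character x/y classification loop with a closed-form
-- parity identity: the answer is the parity of len(s) + #distinct even-ord chars.

-- ===== PORT A =====
def oddEven (s : String) : String :=
  let freq := PySem.Dict.counter s.toList
  let xy := freq.items.foldl (fun (p : Int × Int) (kv : Char × Int) =>
    let position : Int := (kv.1.toNat : Int) - 97 + 1
    if PySem.Int.mod position 2 == 0 then
      (if PySem.Int.mod kv.2 2 == 0 then (p.1 + 1, p.2) else p)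
    else
      (if PySem.Int.mod kv.2 2 != 0 then (p.1, p.2 + 1) else p)) (0, 0)
  if PySem.Int.mod (xy.1 + xy.2) 2 == 0 then "EVEN" else "ODD"

-- ===== PORT B =====
def oddEven_alt (s : String) : String :=
  let distinctEven := (PySem.Set.ofList (s.toList.filter (fun c => c.toNat % 2 == 0))).length
  if (s.toList.length + distinctEven) % 2 == 0 then "EVEN" else "ODD"

-- ===== PRECONDITION & SPEC =====
def Spec_oddEven (s : String) (out : String) : Prop := out = oddEven_alt s
instance (s : String) (out : String) : Decidable (Spec_oddEven s out) := by unfold Spec_oddEven; infer_instance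

-- ===== CLAIM (what is proved, stated in full; the proofs are below) =====
def Claim_equal_oddEven : Prop := ∀ (s : String), Dom_oddEven s → Spec_oddEven s (oddEven s)

-- ===== LEMMAS AND PROOFS =====

-- A's loop body and the predicate it effectively counts
def pvAStep (p : Int × Int) (kv : Char × Int) : Int × Int :=
  let position : Int := (kv.1.toNat : Int) - 97 + 1
  if PySem.Int.mod position 2 == 0 then
    (if PySem.Int.mod kv.2 2 == 0 then (p.1 + 1, p.2) else p)
  else
    (if PySem.Int.mod kv.2 2 != 0 then (p.1, p.2 + 1) else p)

def pvAQual (kv : Char × Int) : Bool :=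
  PySem.Int.mod kv.2 2 == PySem.Int.mod ((kv.1.toNat : Int) - 97 + 1) 2

lemma pvA_sum (items : List (Char × Int)) : ∀ (x y : Int),
    (items.foldl pvAStep (x, y)).1 + (items.foldl pvAStep (x, y)).2
      = x + y + (items.countP pvAQual : Int) := by
  induction items with
  | nil => simp
  | cons kv rest ih =>
    intro x y
    have h2 : PySem.Int.mod kv.2 2 = kv.2 % 2 := PySem.Int.mod_eq_emod_of_pos (by norm_num)
    have hp : PySem.Int.mod ((kv.1.toNat : Int) - 97 + 1) 2 = ((kv.1.toNat : Int) - 96) % 2 := by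
      rw [show ((kv.1.toNat : Int) - 97 + 1) = ((kv.1.toNat : Int) - 96) by ring]
      exact PySem.Int.mod_eq_emod_of_pos (by norm_num)
    simp only [List.foldl_cons, List.countP_cons, pvAStep, pvAQual, h2, hp]
    have h0 : ((kv.1.toNat : Int) - 96) % 2 = 0 ∨ ((kv.1.toNat : Int) - 96) % 2 = 1 := by omega
    have h1 : kv.2 % 2 = 0 ∨ kv.2 % 2 = 1 := by omega
    rcases h0 with h0 | h0 <;> rcases h1 with h1 | h1 <;>
      simp [h0, h1, ih] <;> omega

-- the Nat form of A's per-character predicate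
def pvQual (l : List Char) (c : Char) : Bool := l.count c % 2 == c.toNat % 2

-- parity identity: counting qualifying chars over any char list u has the parity of
-- (the total of their counts) + (the number of even-ord chars among u)
lemma pv_parity (l : List Char) : ∀ (u : List Char),
    u.countP (pvQual l) % 2
      = ((u.map (fun c => l.count c)).sum + u.countP (fun c => c.toNat % 2 == 0)) % 2 := by
  intro u
  induction u with
  | nil => simp
  | cons c rest ih =>
    simp only [List.countP_cons, List.map_cons, List.sum_cons, pvQual]
    rcases Nat.mod_two_eq_zero_or_one (l.count c) with h1 | h1 <;>
      rcases Nat.mod_two_eq_zero_or_one c.toNat with h2 | h2 <;>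
        simp [h1, h2] <;> omega

-- the distinct-element list of l is a permutation of Mathlib's dedup
lemma pv_ofList_perm_dedup (l : List Char) : (PySem.Set.ofList l).Perm l.dedup := by
  rw [List.perm_ext_iff_of_nodup (PySem.Set.nodup_ofList l) l.nodup_dedup]
  intro a
  rw [PySem.Set.mem_ofList, List.mem_dedup]

-- sum of counts over the distinct elements is the length
lemma pv_sum_counts (l : List Char) :
    ((PySem.Set.ofList l).map (fun c => l.count c)).sum = l.length := by
  rw [List.Perm.sum_eq (List.Perm.map _ (pv_ofList_perm_dedup l))]
  exact List.sum_map_count_dedup_eq_length l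

-- the set-comprehension of even-ord chars has as many elements as the
-- even-ord chars among the distinct elements of l
lemma pv_distinct_even (l : List Char) :
    (PySem.Set.ofList (l.filter (fun c => c.toNat % 2 == 0))).length
      = (PySem.Set.ofList l).countP (fun c => c.toNat % 2 == 0) := by
  have hperm : (PySem.Set.ofList (l.filter (fun c => c.toNat % 2 == 0))).Perm
      ((PySem.Set.ofList l).filter (fun c => c.toNat % 2 == 0)) := by
    rw [List.perm_ext_iff_of_nodup (PySem.Set.nodup_ofList _)
      (List.Nodup.filter _ (PySem.Set.nodup_ofList l))]
    intro a
    rw [PySem.Set.mem_ofList, List.mem_filter, List.mem_filter, PySem.Set.mem_ofList]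
  rw [hperm.length_eq, ← List.countP_eq_length_filter]

-- main equivalence
lemma pv_main (s : String) : oddEven s = oddEven_alt s := by
  unfold oddEven oddEven_alt
  dsimp only
  rw [show (fun (p : Int × Int) (kv : Char × Int) =>
        let position : Int := (kv.1.toNat : Int) - 97 + 1
        if PySem.Int.mod position 2 == 0 then
          (if PySem.Int.mod kv.2 2 == 0 then (p.1 + 1, p.2) else p)
        else
          (if PySem.Int.mod kv.2 2 != 0 then (p.1, p.2 + 1) else p)) = pvAStep from rfl]
  generalize s.toList = l
  rw [pvA_sum (PySem.Dict.counter l).items 0 0]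
  have hitems : (PySem.Dict.counter l).items.countP pvAQual
      = (PySem.Set.ofList l).countP (pvQual l) := by
    rw [PySem.Dict.items_counter, List.countP_map]
    refine List.countP_congr ?_
    intro c _
    simp only [Function.comp, pvAQual, pvQual]
    have h2 : PySem.Int.mod ((List.count c l : Nat) : Int) 2 = ((List.count c l : Int)) % 2 :=
      PySem.Int.mod_eq_emod_of_pos (by norm_num)
    have hp : PySem.Int.mod ((c.toNat : Int) - 97 + 1) 2 = ((c.toNat : Int) - 96) % 2 := by
      rw [show ((c.toNat : Int) - 97 + 1) = ((c.toNat : Int) - 96) by ring]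
      exact PySem.Int.mod_eq_emod_of_pos (by norm_num)
    rw [h2, hp]
    have hcnt : ((List.count c l : Int)) % 2 = ((List.count c l % 2 : Nat) : Int) := by omega
    have hord : ((c.toNat : Int) - 96) % 2 = ((c.toNat % 2 : Nat) : Int) := by omega
    rw [hcnt, hord]
    rcases Nat.mod_two_eq_zero_or_one (List.count c l) with h1 | h1 <;>
      rcases Nat.mod_two_eq_zero_or_one c.toNat with h3 | h3 <;>
        simp [h1, h3]
  rw [hitems, pv_distinct_even]
  set N := (PySem.Set.ofList l).countP (pvQual l) with hN
  have hpar : N % 2 = (l.length + (PySem.Set.ofList l).countP (fun c => c.toNat % 2 == 0)) % 2 := by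
    rw [hN, pv_parity l (PySem.Set.ofList l), pv_sum_counts]
  rw [show ((0 : Int) + 0 + (N : Int)) = ((N : Nat) : Int) by push_cast; ring,
      show (2 : Int) = ((2 : Nat) : Int) from rfl, PySem.Int.mod_natCast]
  rcases Nat.mod_two_eq_zero_or_one
      (l.length + (PySem.Set.ofList l).countP (fun c => c.toNat % 2 == 0)) with h | h <;>
    rw [hpar, h] <;> simp

-- ===== VERDICT (by name: the statement is the Claim_ definition above) =====
theorem oddEven_spec : Claim_equal_oddEven := by
  intro s _
  unfold Spec_oddEven
  exact pv_main s
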